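-- pv_equiv track=rewrite | github.com/aronbecker/praktyki2 | import/utils.py | getCategoryFromPkd
-- ===== SOURCE A (Python) =====
-- def getCategoryFromPkd(pkdCode: str) -> str:
--     """
--     Zwraca kategorię (string) odpowiednią do kodu PKD.
--     """
--     try:
--         code = int(pkdCode[0]+pkdCode[1])
--     except ValueError:
--         return ""
--
--     for codes, category in PKD_TO_CATEGORY.items():
--         if code in codes:
--             return category
--
--     return ""
--
-- PKD_TO_CATEGORY = {
--     (1, 2, 3): "ROLNICTWO, LEŚNICTWO I RYBACTWO",
--     (5, 6, 7, 8, 9): "GÓRNICTWO I WYDOBYWANIE",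
--     tuple(range(10, 34)): "PRZETWÓRSTWO PRZEMYSŁOWE",
--     (35,): "ZAOPATRZENIE ENERGETYCZNE OBIEKTÓW",
--     (36, 37, 38, 39): "USŁUGI KOMUNALNE I REKULTYWACJA",
--     (41, 42, 43): "BUDOWNICTWO",
--     (46, 47): "HANDEL",
--     (49, 50, 51, 52, 53): "TRANSPORT I LOGISTYKA",
--     (55, 56): "ZAKWATEROWANIE I GASTRONOMIA",
--     (58, 59, 60): "DZIAŁALNOŚĆ MEDIALNO-WYDAWNICZA",
--     (61, 62, 63): "USŁUGI IT I TELEKOMUNIKACJA",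
--     (64, 65, 66): "FINANSE I UBEZPIECZENIA",
--     (68,): "USŁUGI NIERUCHOMOŚCIOWE",
--     (69, 70, 71, 72, 73, 74, 75): "USŁUGI NAUKOWE I TECHNICZNE",
--     (77, 78, 79, 80, 81, 82): "USŁUGI ADMINISTRACYJNE",
--     (84,): "ADMINISTRACJA I OBRONA",
--     (85,): "EDUKACJA",
--     (86, 87, 88): "ZDROWIE I POMOC",
--     (90, 91, 92, 93): "KULTURA I REKREACJA",
--     (94, 95, 96): "USŁUGI RÓŻNE",
--     (97, 98): "GOSPODARSTWA DOMOWE",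
--     (99,): "ORGANIZACJE EKSTERYTORIALNE",
-- }
-- ===== SOURCE B (Python) =====
-- # Interval-boundary table: ascending (start, category); a code's category is the
-- # entry of the greatest start <= code. Gaps and everything >= 100 map to "".
-- _BOUNDS = [
--     (1, "ROLNICTWO, LE\u015aNICTWO I RYBACTWO"),
--     (4, ""),
--     (5, "G\u00d3RNICTWO I WYDOBYWANIE"),
--     (10, "PRZETW\u00d3RSTWO PRZEMYS\u0141OWE"),
--     (34, ""),
--     (35, "ZAOPATRZENIE ENERGETYCZNE OBIEKT\u00d3W"),
--     (36, "US\u0141UGI KOMUNALNE I REKULTYWACJA"),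
--     (40, ""),
--     (41, "BUDOWNICTWO"),
--     (44, ""),
--     (46, "HANDEL"),
--     (48, ""),
--     (49, "TRANSPORT I LOGISTYKA"),
--     (54, ""),
--     (55, "ZAKWATEROWANIE I GASTRONOMIA"),
--     (57, ""),
--     (58, "DZIA\u0141ALNO\u015a\u0106 MEDIALNO-WYDAWNICZA"),
--     (61, "US\u0141UGI IT I TELEKOMUNIKACJA"),
--     (64, "FINANSE I UBEZPIECZENIA"),
--     (67, ""),
--     (68, "US\u0141UGI NIERUCHOMO\u015aCIOWE"),
--     (69, "US\u0141UGI NAUKOWE I TECHNICZNE"),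
--     (76, ""),
--     (77, "US\u0141UGI ADMINISTRACYJNE"),
--     (83, ""),
--     (84, "ADMINISTRACJA I OBRONA"),
--     (85, "EDUKACJA"),
--     (86, "ZDROWIE I POMOC"),
--     (89, ""),
--     (90, "KULTURA I REKREACJA"),
--     (94, "US\u0141UGI R\u00d3\u017bNE"),
--     (97, "GOSPODARSTWA DOMOWE"),
--     (99, "ORGANIZACJE EKSTERYTORIALNE"),
--     (100, ""),
-- ]
--
--
-- def getCategoryFromPkd(pkdCode: str) -> str:
--     """
--     Zwraca kategorię (string) odpowiednią do kodu PKD.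
--     """
--     try:
--         code = int(pkdCode[0] + pkdCode[1])
--     except ValueError:
--         return ""
--     for start, category in reversed(_BOUNDS):
--         if start <= code:
--             return category
--     return ""
-- ===== Notes on version B (the rewrite author's own statement) =====
-- stated objective: alternative
-- what changed: Replaces the grouped code-list dict scanned with a per-group membership test by a sorted interval-boundary table scanned from the highest start downwards for the first start <= code.
import Mathlib
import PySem

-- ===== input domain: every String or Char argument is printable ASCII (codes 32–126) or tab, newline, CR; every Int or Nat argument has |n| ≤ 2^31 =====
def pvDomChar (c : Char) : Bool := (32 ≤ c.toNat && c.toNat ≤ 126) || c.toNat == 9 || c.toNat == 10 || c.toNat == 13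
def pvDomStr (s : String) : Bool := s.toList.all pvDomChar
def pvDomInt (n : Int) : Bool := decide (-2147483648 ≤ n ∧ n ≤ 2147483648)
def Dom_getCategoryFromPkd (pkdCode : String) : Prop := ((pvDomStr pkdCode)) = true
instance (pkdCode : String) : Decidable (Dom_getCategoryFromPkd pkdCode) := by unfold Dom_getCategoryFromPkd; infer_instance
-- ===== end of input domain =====

-- B replaces A's scan over grouped code-lists (per-group membership test) by a sorted
-- interval-boundary table scanned from the top for the first start ≤ code; same values.


-- ===== PORT A =====
-- PKD_TO_CATEGORY (dict as association list, insertion order), A's module constant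
def pkdTable : List (List Int × String) := [
  ([1, 2, 3], "ROLNICTWO, LEŚNICTWO I RYBACTWO"),
  ([5, 6, 7, 8, 9], "GÓRNICTWO I WYDOBYWANIE"),
  ([10, 11, 12, 13, 14, 15, 16, 17, 18, 19, 20, 21, 22, 23, 24, 25, 26, 27, 28, 29, 30, 31, 32, 33], "PRZETWÓRSTWO PRZEMYSŁOWE"),
  ([35], "ZAOPATRZENIE ENERGETYCZNE OBIEKTÓW"),
  ([36, 37, 38, 39], "USŁUGI KOMUNALNE I REKULTYWACJA"),
  ([41, 42, 43], "BUDOWNICTWO"),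
  ([46, 47], "HANDEL"),
  ([49, 50, 51, 52, 53], "TRANSPORT I LOGISTYKA"),
  ([55, 56], "ZAKWATEROWANIE I GASTRONOMIA"),
  ([58, 59, 60], "DZIAŁALNOŚĆ MEDIALNO-WYDAWNICZA"),
  ([61, 62, 63], "USŁUGI IT I TELEKOMUNIKACJA"),
  ([64, 65, 66], "FINANSE I UBEZPIECZENIA"),
  ([68], "USŁUGI NIERUCHOMOŚCIOWE"),
  ([69, 70, 71, 72, 73, 74, 75], "USŁUGI NAUKOWE I TECHNICZNE"),
  ([77, 78, 79, 80, 81, 82], "USŁUGI ADMINISTRACYJNE"),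
  ([84], "ADMINISTRACJA I OBRONA"),
  ([85], "EDUKACJA"),
  ([86, 87, 88], "ZDROWIE I POMOC"),
  ([90, 91, 92, 93], "KULTURA I REKREACJA"),
  ([94, 95, 96], "USŁUGI RÓŻNE"),
  ([97, 98], "GOSPODARSTWA DOMOWE"),
  ([99], "ORGANIZACJE EKSTERYTORIALNE")]

-- the for-loop over PKD_TO_CATEGORY.items(): first group containing code wins
def findCatA (code : Int) : List (List Int × String) → String
  | [] => ""
  | (codes, cat) :: rest => if code ∈ codes then cat else findCatA code rest

def getCategoryFromPkd (pkdCode : String) : String :=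
  match PySem.Str.pyGet? pkdCode 0, PySem.Str.pyGet? pkdCode 1 with
  | some c0, some c1 =>           -- IndexError (len < 2) is excluded by Pre_
    match PySem.Int.ofChars? [c0, c1] with
    | none => ""                  -- except ValueError: return ""
    | some code => findCatA code pkdTable
  | _, _ => ""

-- ===== PORT B =====
-- _BOUNDS: ascending (start, category) interval boundaries, Source B's module constant
def pkdBounds : List (Int × String) := [
  (1, "ROLNICTWO, LEŚNICTWO I RYBACTWO"), (4, ""),
  (5, "GÓRNICTWO I WYDOBYWANIE"),
  (10, "PRZETWÓRSTWO PRZEMYSŁOWE"), (34, ""),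
  (35, "ZAOPATRZENIE ENERGETYCZNE OBIEKTÓW"),
  (36, "USŁUGI KOMUNALNE I REKULTYWACJA"), (40, ""),
  (41, "BUDOWNICTWO"), (44, ""),
  (46, "HANDEL"), (48, ""),
  (49, "TRANSPORT I LOGISTYKA"), (54, ""),
  (55, "ZAKWATEROWANIE I GASTRONOMIA"), (57, ""),
  (58, "DZIAŁALNOŚĆ MEDIALNO-WYDAWNICZA"),
  (61, "USŁUGI IT I TELEKOMUNIKACJA"),
  (64, "FINANSE I UBEZPIECZENIA"), (67, ""),
  (68, "USŁUGI NIERUCHOMOŚCIOWE"),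
  (69, "USŁUGI NAUKOWE I TECHNICZNE"), (76, ""),
  (77, "USŁUGI ADMINISTRACYJNE"), (83, ""),
  (84, "ADMINISTRACJA I OBRONA"),
  (85, "EDUKACJA"),
  (86, "ZDROWIE I POMOC"), (89, ""),
  (90, "KULTURA I REKREACJA"),
  (94, "USŁUGI RÓŻNE"),
  (97, "GOSPODARSTWA DOMOWE"),
  (99, "ORGANIZACJE EKSTERYTORIALNE"),
  (100, "")]

-- the 'for start, category in reversed(_BOUNDS)' loop: first start ≤ code wins
def firstLE (code : Int) : List (Int × String) → String
  | [] => ""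
  | (start, cat) :: rest => if start ≤ code then cat else firstLE code rest

def getCategoryFromPkd_alt (pkdCode : String) : String :=
  ((((PySem.Str.pyGet? pkdCode 0).bind fun c0 =>
      (PySem.Str.pyGet? pkdCode 1).bind fun c1 =>
        PySem.Int.ofChars? [c0, c1]).map fun (code : Int) =>
          firstLE code pkdBounds.reverse).getD "")

-- ===== PRECONDITION & SPEC =====
-- Pre_ excludes strings of length < 2, on which A raises an uncaught IndexError.
def Pre_getCategoryFromPkd (pkdCode : String) : Prop := 2 ≤ pkdCode.toList.length
instance (pkdCode : String) : Decidable (Pre_getCategoryFromPkd pkdCode) := by unfold Pre_getCategoryFromPkd; infer_instance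
def pvWitness_getCategoryFromPkd : String := "62"

def Spec_getCategoryFromPkd (pkdCode : String) (out : String) : Prop := out = getCategoryFromPkd_alt pkdCode
instance (pkdCode : String) (out : String) : Decidable (Spec_getCategoryFromPkd pkdCode out) := by unfold Spec_getCategoryFromPkd; infer_instance

-- ===== CLAIM (what is proved, stated in full; the proofs are below) =====
def Claim_equal_getCategoryFromPkd : Prop := ∀ (pkdCode : String), Dom_getCategoryFromPkd pkdCode → Pre_getCategoryFromPkd pkdCode → Spec_getCategoryFromPkd pkdCode (getCategoryFromPkd pkdCode)

-- ===== LEMMAS AND PROOFS =====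

-- every code occurring in a group lies in [1, 99]
set_option maxRecDepth 4000 in
theorem pkdTable_codes_bounded :
    ∀ g ∈ pkdTable, ∀ c ∈ g.1, 1 ≤ c ∧ c ≤ 99 := by decide

theorem findCatA_of_not_mem (code : Int) (l : List (List Int × String))
    (h : ∀ g ∈ l, code ∉ g.1) : findCatA code l = "" := by
  induction l with
  | nil => rfl
  | cons g rest ih =>
      simp only [findCatA]
      rw [if_neg (h g (List.mem_cons_self))]
      exact ih fun g' hg' => h g' (List.mem_cons_of_mem _ hg')

theorem firstLE_of_lt (code : Int) (l : List (Int × String))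
    (h : ∀ p ∈ l, code < p.1) : firstLE code l = "" := by
  induction l with
  | nil => rfl
  | cons p rest ih =>
      simp only [firstLE]
      rw [if_neg (by exact not_le.mpr (h p (List.mem_cons_self)))]
      exact ih fun p' hp' => h p' (List.mem_cons_of_mem _ hp')

set_option maxRecDepth 10000 in
theorem agree_in_range :
    ∀ n : Fin 100, findCatA (n : Int) pkdTable = firstLE (n : Int) pkdBounds.reverse := by
  decide

theorem scan_agree (code : Int) :
    findCatA code pkdTable = firstLE code pkdBounds.reverse := by
  rcases lt_trichotomy code 0 with hneg | h0 | hpos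
  · rw [findCatA_of_not_mem code pkdTable
        (fun g hg hc => by have := pkdTable_codes_bounded g hg code hc; omega),
      firstLE_of_lt code pkdBounds.reverse
        (fun p hp => by
          have : 1 ≤ p.1 := by revert hp; rw [List.mem_reverse]; revert p; decide
          omega)]
  · subst h0
    exact agree_in_range (0 : Fin 100)
  · by_cases h100 : code < 100
    · have hn : code = ((⟨code.toNat, by omega⟩ : Fin 100) : Int) := by simp; omega
      rw [hn]; exact agree_in_range _
    · rw [findCatA_of_not_mem code pkdTable
          (fun g hg hc => by have := pkdTable_codes_bounded g hg code hc; omega)]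
      show _ = firstLE code ((100, "") :: _)
      rw [firstLE, if_pos (by omega)]

-- ===== VERDICT (by name: the statement is the Claim_ definition above) =====
theorem getCategoryFromPkd_spec : Claim_equal_getCategoryFromPkd := by
  intro pkdCode _ _
  unfold Spec_getCategoryFromPkd getCategoryFromPkd getCategoryFromPkd_alt
  cases h0 : PySem.Str.pyGet? pkdCode 0 with
  | none => rfl
  | some c0 =>
    cases h1 : PySem.Str.pyGet? pkdCode 1 with
    | none => rfl
    | some c1 =>
      cases h2 : PySem.Int.ofChars? [c0, c1] with
      | none => simp [h2]
      | some code => simp [h2, scan_agree]
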